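-- pv_equiv track=rewrite | github.com/HwangRock/C-_STUDY_MediaLab | Programmers/박채원/최고의집합_박채원.py | solution
-- ===== SOURCE A (Python) =====
-- def solution(n, s):
--     # s가 n보다 작은 경우
--     if s < n:
--         return [-1]
--
--     # 몫과 나머지 계산
--     quotient = s // n
--     remainder = s % n
--
--     # 기본 배열을 몫으로 채운다
--     best_set = [quotient] * n
--
--     # 나머지를 분배하여 각 원소에 1씩 추가
--     for i in range(remainder):
--         best_set[i] += 1
--
--     # 결과는 오름차순으로 정렬되어 있음
--     best_set.sort()
--     return best_set
-- ===== SOURCE B (Python) =====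
-- def solution(n, s):
--     if s < n:
--         return [-1]
--     return [(s + i) // n for i in range(n)]
-- ===== Notes on version B (the rewrite author's own statement) =====
-- stated objective: alternative
-- what changed: B computes each element independently by the closed per-index formula (s+i)//n instead of A's fill-with-quotient array, per-unit increment loop and final sort; no quotient/remainder state or mutation is kept.
import Mathlib
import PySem

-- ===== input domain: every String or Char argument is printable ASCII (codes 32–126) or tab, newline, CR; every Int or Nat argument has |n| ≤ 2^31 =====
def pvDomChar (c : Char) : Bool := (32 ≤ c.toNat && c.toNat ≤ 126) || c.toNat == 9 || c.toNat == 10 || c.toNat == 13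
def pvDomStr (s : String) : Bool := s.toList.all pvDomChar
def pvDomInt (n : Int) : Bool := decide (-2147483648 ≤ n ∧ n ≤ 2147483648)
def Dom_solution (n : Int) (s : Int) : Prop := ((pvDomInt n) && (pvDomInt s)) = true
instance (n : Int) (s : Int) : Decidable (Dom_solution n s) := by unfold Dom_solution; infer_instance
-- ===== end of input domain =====

-- B computes each element directly as (s + i) // n for i in range(n), with no quotient/remainder state, no increment loop and no sort (objective: alternative).

-- ===== PORT A =====
def solution (n : Int) (s : Int) : List Int :=
  if s < n then [-1]
  else
    let quotient := PySem.Int.floordiv s n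
    let remainder := PySem.Int.mod s n
    let best_set := PySem.List.pyRepeat [quotient] n
    let best_set := (PySem.List.pyRange 0 remainder 1).foldl
      (fun acc i => PySem.List.pySetD acc i (PySem.List.pyGetD acc i 0 + 1)) best_set
    PySem.List.sorted best_set (fun x => x) false

-- ===== PORT B =====
def solution_alt (n : Int) (s : Int) : List Int :=
  if s < n then [-1]
  else (PySem.List.pyRange 0 n 1).map (fun i => PySem.Int.floordiv (s + i) n)

-- ===== PRECONDITION & SPEC =====
-- Pre_ excludes only n = 0 with 0 ≤ s, where A raises ZeroDivisionError.
def Pre_solution (n : Int) (s : Int) : Prop := n = 0 → s < 0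
instance (n : Int) (s : Int) : Decidable (Pre_solution n s) := by unfold Pre_solution; infer_instance
def pvWitness_solution : Int × Int := (3, 11)
def Spec_solution (n : Int) (s : Int) (out : List Int) : Prop := out = solution_alt n s
instance (n : Int) (s : Int) (out : List Int) : Decidable (Spec_solution n s out) := by unfold Spec_solution; infer_instance

-- ===== CLAIM (what is proved, stated in full; the proofs are below) =====
def Claim_equal_solution : Prop := ∀ (n : Int) (s : Int), Dom_solution n s → Pre_solution n s → Spec_solution n s (solution n s)

-- ===== LEMMAS AND PROOFS =====

-- After incrementing indices 0..k-1 of [q]*nn, the list is [q+1]*k ++ [q]*(nn-k).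
lemma loop_inc (q : Int) (nn : Nat) (k : Nat) (hk : k ≤ nn) :
    (PySem.List.pyRange 0 (k : Int) 1).foldl
      (fun acc i => PySem.List.pySetD acc i (PySem.List.pyGetD acc i 0 + 1))
      (List.replicate nn q)
    = List.replicate k (q + 1) ++ List.replicate (nn - k) q := by
  induction k with
  | zero => simp [PySem.List.pyRange_one_eq_nil]
  | succ k ih =>
    have hk' : k ≤ nn := Nat.le_of_succ_le hk
    have hsplit : PySem.List.pyRange 0 ((k + 1 : Nat) : Int) 1
        = PySem.List.pyRange 0 (k : Int) 1 ++ [(k : Int)] := by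
      have := PySem.List.pyRange_one_succ_right (a := 0) (b := (k : Int)) (by positivity)
      simpa using this
    rw [hsplit, List.foldl_append, ih hk']
    have hget : PySem.List.pyGetD
        (List.replicate k (q + 1) ++ List.replicate (nn - k) q) (k : Int) 0 = q := by
      have hlen : k < (List.replicate k (q + 1) ++ List.replicate (nn - k) q).length := by
        simp; omega
      rw [PySem.List.pyGetD_natCast]
      rw [List.getD_eq_getElem _ _ hlen]
      rw [List.getElem_append_right (by simp)]
      simp
    simp only [List.foldl_cons, List.foldl_nil]
    rw [hget, PySem.List.pySetD_natCast]
    have hset : (List.replicate k (q + 1) ++ List.replicate (nn - k) q).set k (q + 1)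
        = List.replicate (k + 1) (q + 1) ++ List.replicate (nn - (k + 1)) q := by
      rw [List.set_append_right _ _ (by simp)]
      simp only [List.length_replicate, Nat.sub_self]
      have : nn - k = (nn - (k + 1)) + 1 := by omega
      rw [this, List.replicate_succ, List.set_cons_zero]
      rw [List.replicate_succ' (n := k)]
      simp
    rw [hset]

lemma sorted_two_blocks (q : Int) (a b : Nat) :
    PySem.List.sorted (List.replicate b (q + 1) ++ List.replicate a q) (fun x => x) false
    = List.replicate a q ++ List.replicate b (q + 1) := by
  apply PySem.List.sorted_id_eq_of_perm_of_pairwise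
  · exact List.perm_append_comm
  · rw [List.pairwise_append]
    refine ⟨List.pairwise_replicate.mpr (by omega), List.pairwise_replicate.mpr (by omega), ?_⟩
    intro x hx y hy
    rw [List.eq_of_mem_replicate hx, List.eq_of_mem_replicate hy]
    omega

-- B's per-index formula, split at n - r, gives the two constant blocks.
lemma map_range_blocks (n s : Int) (hpos : 0 < n) :
    (PySem.List.pyRange 0 n 1).map (fun i => PySem.Int.floordiv (s + i) n)
    = List.replicate (n - PySem.Int.mod s n).toNat (PySem.Int.floordiv s n)
      ++ List.replicate (PySem.Int.mod s n).toNat (PySem.Int.floordiv s n + 1) := by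
  set q := PySem.Int.floordiv s n with hq
  set r := PySem.Int.mod s n with hr
  have hr0 : 0 ≤ r := PySem.Int.mod_nonneg _ hpos
  have hrlt : r < n := PySem.Int.mod_lt _ hpos
  have hqr : q * n + r = s := PySem.Int.floordiv_mul_add_mod s n
  have hsplit : PySem.List.pyRange 0 n 1
      = PySem.List.pyRange 0 (n - r) 1 ++ PySem.List.pyRange (n - r) n 1 :=
    PySem.List.pyRange_one_append 0 (n - r) n (by omega) (by omega)
  rw [hsplit, List.map_append]
  congr 1
  · rw [List.eq_replicate_iff]
    refine ⟨by rw [List.length_map, PySem.List.length_pyRange_one]; omega, ?_⟩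
    intro x hx
    simp only [List.mem_map] at hx
    obtain ⟨i, hi, hxe⟩ := hx
    rw [PySem.List.mem_pyRange_one] at hi
    rw [← hxe, (PySem.Int.floordiv_eq_iff_of_pos hpos)]
    constructor <;> nlinarith
  · rw [List.eq_replicate_iff]
    refine ⟨by rw [List.length_map, PySem.List.length_pyRange_one]; omega, ?_⟩
    intro x hx
    simp only [List.mem_map] at hx
    obtain ⟨i, hi, hxe⟩ := hx
    rw [PySem.List.mem_pyRange_one] at hi
    rw [← hxe, (PySem.Int.floordiv_eq_iff_of_pos hpos)]
    constructor <;> nlinarith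

-- ===== VERDICT (by name: the statement is the Claim_ definition above) =====
theorem solution_spec : Claim_equal_solution := by
  intro n s _ hpre
  unfold Spec_solution solution solution_alt
  by_cases hlt : s < n
  · simp [hlt]
  · simp only [hlt, if_false]
    have hn0 : n ≠ 0 := by
      intro h; subst h; exact hlt (hpre rfl)
    by_cases hpos : 0 < n
    · have hr0 : 0 ≤ PySem.Int.mod s n := PySem.Int.mod_nonneg _ hpos
      have hrlt : PySem.Int.mod s n < n := PySem.Int.mod_lt _ hpos
      set q := PySem.Int.floordiv s n with hq
      set r := PySem.Int.mod s n with hrdef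
      obtain ⟨rn, hrn⟩ : ∃ rn : Nat, r = (rn : Int) := ⟨r.toNat, by omega⟩
      have hle : rn ≤ n.toNat := by omega
      rw [PySem.List.pyRepeat_singleton]
      rw [hrn, loop_inc q n.toNat rn hle, sorted_two_blocks]
      rw [map_range_blocks n s hpos]
      have e1 : (n - r).toNat = n.toNat - rn := by omega
      have e2 : r.toNat = rn := by omega
      rw [← hrdef, ← hq, e1, e2]
    · -- negative n : both sides are []
      have hneg : n < 0 := by omega
      have hb := PySem.Int.mod_neg_bounds (a := s) (b := n) hneg
      have h1 : PySem.List.pyRepeat [PySem.Int.floordiv s n] n = [] := by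
        rw [PySem.List.pyRepeat_singleton]
        have : n.toNat = 0 := by omega
        simp [this]
      have h2 : PySem.List.pyRange 0 (PySem.Int.mod s n) 1 = [] :=
        PySem.List.pyRange_one_eq_nil (by omega)
      have h3 : PySem.List.pyRange 0 n 1 = [] :=
        PySem.List.pyRange_one_eq_nil (by omega)
      rw [h1, h2, h3]
      simp [PySem.List.sorted]
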